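-- pv_equiv track=rewrite | github.com/eexxyy/Spine-Toolbox | spinetoolbox/spine_io/exporters/gdx.py | _update_names
-- ===== SOURCE A (Python) =====
-- def _update_names(names, metadatas, updating_names, updating_metadatas):
--     """Updates a list of domain/set names and exportable flags based on reference names and flags."""
--     new_names = list()
--     new_metadatas = list()
--     updating_names = list(updating_names)
--     updating_metadatas = list(updating_metadatas)
--     for name, metadata in zip(names, metadatas):
--         try:
--             index = updating_names.index(name)
--             del updating_names[index]
--             del updating_metadatas[index]
--             new_names.append(name)
--             new_metadatas.append(metadata)
--         except ValueError:
--             # name not found in updating_names -- skip it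
--             continue
--     new_names += updating_names
--     new_metadatas += updating_metadatas
--     return new_names, new_metadatas
-- ===== SOURCE B (Python) =====
-- def _update_names(names, metadatas, updating_names, updating_metadatas):
--     """Reconcile names/metadata with the updating lists in O(n+m): index each
--     updating name's positions once, match names by advancing a per-name cursor,
--     and emit the survivors by filtering out the matched positions."""
--     positions = {}
--     for i, name in enumerate(updating_names):
--         positions.setdefault(name, []).append(i)
--     cursor = {}
--     matched_positions = set()
--     new_names = []
--     new_metadatas = []
--     for name, metadata in zip(names, metadatas):
--         queue = positions.get(name, [])
--         c = cursor.get(name, 0)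
--         if c < len(queue):
--             matched_positions.add(queue[c])
--             cursor[name] = c + 1
--             new_names.append(name)
--             new_metadatas.append(metadata)
--     new_names += [n for i, n in enumerate(updating_names) if i not in matched_positions]
--     new_metadatas += [m for i, m in enumerate(updating_metadatas) if i not in matched_positions]
--     return new_names, new_metadatas
-- ===== Notes on version B (the rewrite author's own statement) =====
-- stated objective: faster
-- what changed: Replaces the per-name list.index scan plus del-by-index bookkeeping with a one-pass position index (name -> list of indices), per-name cursors and a set of matched positions, emitting survivors by filtering on that set: O(n+m) instead of O(n*m).
import Mathlib
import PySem

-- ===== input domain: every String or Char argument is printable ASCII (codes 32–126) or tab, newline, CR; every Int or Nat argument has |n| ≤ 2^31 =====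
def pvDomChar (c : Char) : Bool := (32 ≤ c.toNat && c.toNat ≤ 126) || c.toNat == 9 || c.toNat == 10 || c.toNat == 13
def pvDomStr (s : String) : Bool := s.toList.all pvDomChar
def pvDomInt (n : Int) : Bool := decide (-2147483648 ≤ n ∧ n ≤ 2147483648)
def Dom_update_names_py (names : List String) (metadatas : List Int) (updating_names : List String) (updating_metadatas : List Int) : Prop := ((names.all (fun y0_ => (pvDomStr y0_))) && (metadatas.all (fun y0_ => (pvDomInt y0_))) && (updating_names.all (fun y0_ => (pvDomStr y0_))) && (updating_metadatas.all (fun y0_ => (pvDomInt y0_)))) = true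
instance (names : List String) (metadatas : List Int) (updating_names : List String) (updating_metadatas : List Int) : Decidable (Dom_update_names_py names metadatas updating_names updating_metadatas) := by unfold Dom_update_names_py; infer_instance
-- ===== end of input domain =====

-- B replaces A's repeated list.index/del-by-index scans by a one-pass position index,
-- per-name cursors and a matched-position set (O(n+m) instead of O(n*m)).

-- ===== PORT A =====
-- the loop 'for name, metadata in zip(names, metadatas)' with state (new_names, new_metadatas, updating_names, updating_metadatas);
-- 'del xs[index]' is List.eraseIdx (Pre_ keeps the second del in range, where Python would raise IndexError)
def goA : List (String × Int) → List String → List Int → List String → List Int → List String × List Int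
  | [], nn, nm, un, um => (nn ++ un, nm ++ um)
  | (name, md) :: rest, nn, nm, un, um =>
    match PySem.List.index? un name with
    | some i => goA rest (nn ++ [name]) (nm ++ [md]) (un.eraseIdx i) (um.eraseIdx i)
    | none => goA rest nn nm un um

def update_names_py (names : List String) (metadatas : List Int) (updating_names : List String) (updating_metadatas : List Int) : List String × List Int :=
  goA (names.zip metadatas) [] [] updating_names updating_metadatas

-- ===== PORT B =====
-- first loop of Source B: positions.setdefault(name, []).append(i)
def positionsOf (un : List String) : PySem.Dict String (List Nat) :=
  (un.zipIdx).foldl (fun d p => d.insert p.1 (d.getD p.1 [] ++ [p.2])) PySem.Dict.empty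

-- second loop of Source B: match by advancing a per-name cursor, recording matched positions
def goB : List (String × Int) → PySem.Dict String (List Nat) → PySem.Dict String Nat → PySem.Set Nat → List String → List Int → PySem.Set Nat × List String × List Int
  | [], _, _, del, nn, nm => (del, nn, nm)
  | (name, md) :: rest, pos, cur, del, nn, nm =>
    if cur.getD name 0 < (pos.getD name []).length then
      goB rest pos (cur.insert name (cur.getD name 0 + 1))
        (del.add ((pos.getD name []).getD (cur.getD name 0) 0)) (nn ++ [name]) (nm ++ [md])
    else
      goB rest pos cur del nn nm

-- the two final comprehensions of Source B: keep entries whose position was not matched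
def survivors {α : Type} (del : PySem.Set Nat) (xs : List α) : List α :=
  ((xs.zipIdx).filter (fun p => !(del.contains p.2))).map Prod.fst

def update_names_py_alt (names : List String) (metadatas : List Int) (updating_names : List String) (updating_metadatas : List Int) : List String × List Int :=
  match goB (names.zip metadatas) (positionsOf updating_names) PySem.Dict.empty PySem.Set.empty [] [] with
  | (del, nn, nm) => (nn ++ survivors del updating_names, nm ++ survivors del updating_metadatas)

-- ===== PRECONDITION & SPEC =====
-- Pre_ is exactly the inputs on which A returns: it fails precisely when some matched name sits at an index
-- of updating_names that has no counterpart in updating_metadatas, where A's 'del updating_metadatas[index]'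
-- raises IndexError (the i-th name is matched iff its earlier-occurrence count is below
-- min(count among zipped names, count in updating_names)).
def Pre_update_names_py (names : List String) (metadatas : List Int) (updating_names : List String) (updating_metadatas : List Int) : Prop :=
  ∀ i, i < updating_names.length → updating_metadatas.length ≤ i →
    min (((names.zip metadatas).map Prod.fst).count (updating_names.getD i ""))
        (updating_names.count (updating_names.getD i ""))
      ≤ (updating_names.take i).count (updating_names.getD i "")
instance (names : List String) (metadatas : List Int) (updating_names : List String) (updating_metadatas : List Int) : Decidable (Pre_update_names_py names metadatas updating_names updating_metadatas) := by unfold Pre_update_names_py; infer_instance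

def pvWitness_update_names_py : List String × List Int × List String × List Int :=
  (["a"], [1], ["a", "b"], [10, 20])

def Spec_update_names_py (names : List String) (metadatas : List Int) (updating_names : List String) (updating_metadatas : List Int) (out : List String × List Int) : Prop := out = update_names_py_alt names metadatas updating_names updating_metadatas
instance (names : List String) (metadatas : List Int) (updating_names : List String) (updating_metadatas : List Int) (out : List String × List Int) : Decidable (Spec_update_names_py names metadatas updating_names updating_metadatas out) := by unfold Spec_update_names_py; infer_instance

-- ===== CLAIM (what is proved, stated in full; the proofs are below) =====
def Claim_equal_update_names_py : Prop := ∀ (names : List String) (metadatas : List Int) (updating_names : List String) (updating_metadatas : List Int), Dom_update_names_py names metadatas updating_names updating_metadatas → Pre_update_names_py names metadatas updating_names updating_metadatas → Spec_update_names_py names metadatas updating_names updating_metadatas (update_names_py names metadatas updating_names updating_metadatas)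


-- ===== LEMMAS AND PROOFS =====

-- survivors of xs under a deleted-position list, with indices starting at k (proof-side view of B's filters)
def sIdx {α : Type} (D : List Nat) : Nat → List α → List α
  | _, [] => []
  | k, x :: t => if k ∈ D then sIdx D (k+1) t else x :: sIdx D (k+1) t

-- positions of the occurrences of n, indices starting at k (proof-side view of positions[n])
def oF (n : String) : Nat → List String → List Nat
  | _, [] => []
  | k, x :: t => if x = n then k :: oF n (k+1) t else oF n (k+1) t

-- number of surviving positions in [k, k+r)
def cnt' (D : List Nat) (k r : Nat) : Nat := ((List.range' k r).filter (fun j => !(List.contains D j))).length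

theorem survivors_eq_sIdx_aux {α : Type} (D : PySem.Set Nat) : ∀ (xs : List α) (k : Nat),
    ((xs.zipIdx k).filter (fun p => !(decide (p.2 ∈ D)))).map Prod.fst = sIdx D k xs := by
  intro xs
  induction xs with
  | nil => intro k; simp [sIdx]
  | cons x t ih =>
    intro k
    rw [List.zipIdx_cons, List.filter_cons]
    by_cases hk : k ∈ D
    · simp [hk, sIdx, ih]
    · simp [hk, sIdx, ih]

theorem survivors_eq_sIdx {α : Type} (D : PySem.Set Nat) (xs : List α) :
    survivors D xs = sIdx D 0 xs := by
  unfold survivors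
  have hf : (fun p : α × Nat => !(PySem.Set.contains D p.2)) = (fun p : α × Nat => !(decide (p.2 ∈ D))) := by
    funext p; simp
  rw [hf, survivors_eq_sIdx_aux]

theorem fold_pos (m : String) : ∀ (L : List (String × Nat)) (d : PySem.Dict String (List Nat)),
    (L.foldl (fun d p => d.insert p.1 (d.getD p.1 [] ++ [p.2])) d).getD m [] =
      d.getD m [] ++ (L.filter (fun p => p.1 == m)).map Prod.snd := by
  intro L
  induction L with
  | nil => intro d; simp
  | cons p t ih =>
    intro d
    rw [List.foldl_cons, ih, List.filter_cons]
    by_cases hm : p.1 = m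
    · rw [PySem.Dict.getD_insert]
      simp [hm]
    · rw [PySem.Dict.getD_insert]
      simp [hm, Ne.symm hm]

theorem oF_zipIdx (n : String) : ∀ (xs : List String) (k : Nat),
    ((xs.zipIdx k).filter (fun p => p.1 == n)).map Prod.snd = oF n k xs := by
  intro xs
  induction xs with
  | nil => intro k; simp [oF]
  | cons x t ih =>
    intro k
    rw [List.zipIdx_cons, List.filter_cons]
    by_cases hx : x = n
    · simp [hx, oF, ih]
    · simp [hx, oF, ih]

theorem positionsOf_getD (un : List String) (n : String) :
    (positionsOf un).getD n [] = oF n 0 un := by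
  unfold positionsOf
  rw [fold_pos, PySem.Dict.getD_empty, List.nil_append, oF_zipIdx]

theorem oF_length (n : String) : ∀ (xs : List String) (k : Nat), (oF n k xs).length = xs.count n := by
  intro xs
  induction xs with
  | nil => intro k; simp [oF]
  | cons x t ih =>
    intro k
    by_cases hx : x = n
    · simp [oF, hx, List.count_cons, ih]
    · simp [oF, hx, List.count_cons, ih]

theorem oF_getD (n : String) : ∀ (xs : List String) (k c : Nat), c < (oF n k xs).length →
    ∃ r, (oF n k xs).getD c 0 = k + r ∧ ∃ hr : r < xs.length, xs[r] = n ∧ (xs.take r).count n = c := by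
  intro xs
  induction xs with
  | nil => intro k c h; simp [oF] at h
  | cons x t ih =>
    intro k c h
    by_cases hx : x = n
    · rw [oF, if_pos hx] at h ⊢
      cases c with
      | zero =>
        refine ⟨0, by simp, by simp, by simpa using hx, by simp⟩
      | succ c' =>
        obtain ⟨r, hr1, hr2, hr3, hr4⟩ := ih (k+1) c' (by simpa using h)
        refine ⟨r + 1, by simpa [Nat.add_assoc, Nat.add_comm 1 r] using hr1, by simpa [Nat.succ_lt_succ_iff] using hr2, by simpa using hr3, ?_⟩
        rw [List.take_succ_cons, List.count_cons, hr4]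
        simp [hx]
    · rw [oF, if_neg hx] at h ⊢
      obtain ⟨r, hr1, hr2, hr3, hr4⟩ := ih (k+1) c h
      refine ⟨r + 1, by simpa [Nat.add_assoc, Nat.add_comm 1 r] using hr1, by simpa [Nat.succ_lt_succ_iff] using hr2, by simpa using hr3, ?_⟩
      rw [List.take_succ_cons, List.count_cons, hr4]
      simp [hx]

theorem count_take_lt (n : String) (xs : List String) (j p : Nat) (hjp : j < p) (hp : p ≤ xs.length)
    (hj : j < xs.length) (hv : xs[j] = n) : (xs.take j).count n < (xs.take p).count n := by
  have h1 : (xs.take (j+1)).count n = (xs.take j).count n + 1 := by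
    rw [List.take_add_one, List.count_append]
    have : xs[j]? = some n := by rw [List.getElem?_eq_getElem hj, hv]
    simp [this]
  have h2 : (xs.take p).count n = ((xs.take p).take (j+1)).count n + ((xs.take p).drop (j+1)).count n := by
    rw [← List.count_append, List.take_append_drop]
  have h3 : (xs.take p).take (j+1) = xs.take (j+1) := by
    rw [List.take_take]
    congr 1
    omega
  rw [h3] at h2
  omega

theorem count_take_lt_count (n : String) (xs : List String) (j : Nat) (hj : j < xs.length)
    (hv : xs[j] = n) : (xs.take j).count n < xs.count n := by
  have := count_take_lt n xs j xs.length hj (le_refl _) hj hv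
  rwa [List.take_length] at this

theorem sIdx_congr {α : Type} (D D' : List Nat) : ∀ (xs : List α) (k : Nat),
    (∀ j, k ≤ j → (j ∈ D ↔ j ∈ D')) → sIdx D k xs = sIdx D' k xs := by
  intro xs
  induction xs with
  | nil => intro k h; simp [sIdx]
  | cons x t ih =>
    intro k h
    have hk : k ∈ D ↔ k ∈ D' := h k (le_refl k)
    by_cases hkD : k ∈ D
    · rw [sIdx, if_pos hkD, sIdx, if_pos (hk.mp hkD)]
      exact ih (k+1) (fun j hj => h j (by omega))
    · rw [sIdx, if_neg hkD, sIdx, if_neg (fun hc => hkD (hk.mpr hc))]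
      rw [ih (k+1) (fun j hj => h j (by omega))]

theorem sIdx_nil {α : Type} : ∀ (xs : List α) (k : Nat), sIdx ([] : List Nat) k xs = xs := by
  intro xs
  induction xs with
  | nil => intro k; simp [sIdx]
  | cons x t ih => intro k; rw [sIdx, if_neg (by simp), ih]

theorem cnt'_zero (D : List Nat) (k : Nat) : cnt' D k 0 = 0 := by simp [cnt']

theorem cnt'_succ (D : List Nat) (k r : Nat) :
    cnt' D k (r+1) = (if k ∈ D then 0 else 1) + cnt' D (k+1) r := by
  rw [cnt', List.range'_succ, List.filter_cons]
  by_cases hk : k ∈ D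
  · simp [hk, cnt']
  · simp [hk, cnt', Nat.add_comm]

theorem sIdx_find (D : List Nat) (v : String) : ∀ (xs : List String) (k r : Nat)
    (hr : r < xs.length), xs[r] = v → (k + r) ∉ D →
    (∀ j (hj : j < r), xs[j]'(by omega) = v → (k + j) ∈ D) →
    PySem.List.index? (sIdx D k xs) v = some (cnt' D k r) := by
  intro xs
  induction xs with
  | nil => intro k r hr; simp at hr
  | cons x t ih =>
    intro k r hr hv hnd hmin
    cases r with
    | zero =>
      have hx : x = v := by simpa using hv
      have hkD : k ∉ D := by simpa using hnd
      rw [sIdx, if_neg hkD, hx, PySem.List.index?_cons_self, cnt'_zero]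
    | succ s =>
      by_cases hkD : k ∈ D
      · rw [sIdx, if_pos hkD, cnt'_succ, if_pos hkD]
        have := ih (k+1) s (by simpa [Nat.succ_lt_succ_iff] using hr)
          (by simpa using hv) (by simpa [Nat.add_assoc, Nat.add_comm 1 s] using hnd)
          (fun j hj hjv => by
            have := hmin (j+1) (by omega) (by simpa using hjv)
            simpa [Nat.add_assoc, Nat.add_comm 1 j] using this)
        simpa using this
      · have hx : x ≠ v := by
          intro hxv
          exact hkD (by simpa using hmin 0 (by omega) (by simpa using hxv))
        rw [sIdx, if_neg hkD, PySem.List.index?_cons_of_ne _ hx, cnt'_succ, if_neg hkD]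
        have := ih (k+1) s (by simpa [Nat.succ_lt_succ_iff] using hr)
          (by simpa using hv) (by simpa [Nat.add_assoc, Nat.add_comm 1 s] using hnd)
          (fun j hj hjv => by
            have := hmin (j+1) (by omega) (by simpa using hjv)
            simpa [Nat.add_assoc, Nat.add_comm 1 j] using this)
        rw [this]
        simp [Nat.add_comm]

theorem sIdx_erase {α : Type} (D : List Nat) : ∀ (xs : List α) (k r : Nat)
    (hr : r < xs.length), (k + r) ∉ D →
    (sIdx D k xs).eraseIdx (cnt' D k r) = sIdx (D ++ [k + r]) k xs := by
  intro xs
  induction xs with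
  | nil => intro k r hr; simp at hr
  | cons x t ih =>
    intro k r hr hnd
    cases r with
    | zero =>
      have hkD : k ∉ D := by simpa using hnd
      rw [sIdx, if_neg hkD, cnt'_zero, List.eraseIdx_cons_zero]
      rw [sIdx, if_pos (by simp)]
      exact sIdx_congr D (D ++ [k + 0]) t (k+1) (fun j hj => by
        simp only [List.mem_append, List.mem_singleton]
        constructor
        · exact Or.inl
        · rintro (h | h)
          · exact h
          · exact absurd h (by omega))
    | succ s =>
      have hnd' : (k + 1) + s ∉ D := by simpa [Nat.add_assoc, Nat.add_comm 1 s] using hnd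
      have hr' : s < t.length := by simpa [Nat.succ_lt_succ_iff] using hr
      have heq : (k + 1) + s = k + (s + 1) := by omega
      by_cases hkD : k ∈ D
      · rw [sIdx, if_pos hkD, cnt'_succ, if_pos hkD]
        rw [sIdx, if_pos (by simp [hkD])]
        have := ih (k+1) s hr' hnd'
        rw [heq] at this
        simpa using this
      · have hkD' : k ∉ D ++ [k + (s+1)] := by
          simp [hkD]
        rw [sIdx, if_neg hkD, cnt'_succ, if_neg hkD, Nat.add_comm 1 _, List.eraseIdx_cons_succ]
        rw [sIdx, if_neg hkD']
        have := ih (k+1) s hr' hnd'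
        rw [heq] at this
        rw [this]

theorem sIdx_none (D : List Nat) (v : String) : ∀ (xs : List String) (k : Nat),
    (∀ r (hr : r < xs.length), xs[r] = v → (k + r) ∈ D) → v ∉ sIdx D k xs := by
  intro xs
  induction xs with
  | nil => intro k h; simp [sIdx]
  | cons x t ih =>
    intro k h
    have ht : v ∉ sIdx D (k+1) t := ih (k+1) (fun r hr hrv => by
      have := h (r+1) (by simpa [Nat.succ_lt_succ_iff] using hr) (by simpa using hrv)
      simpa [Nat.add_assoc, Nat.add_comm 1 r] using this)
    by_cases hkD : k ∈ D
    · rw [sIdx, if_pos hkD]; exact ht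
    · rw [sIdx, if_neg hkD]
      intro hmem
      rcases List.mem_cons.mp hmem with hxe | hm
      · exact hkD (by simpa using h 0 (by simp) (by simpa using hxe.symm))
      · exact ht hm

theorem main_loop (un : List String) (um : List Int) (N : String → Nat)
    (hpre : ∀ i, i < un.length → um.length ≤ i →
      min (N (un.getD i "")) (un.count (un.getD i "")) ≤ (un.take i).count (un.getD i "")) :
    ∀ (pairs : List (String × Int)) (cur : PySem.Dict String Nat) (c : String → Nat)
      (del : PySem.Set Nat) (nn : List String) (nm : List Int),
      (∀ n, cur.getD n 0 = c n) →
      (∀ n, c n ≤ un.count n) →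
      (∀ n, c n + (pairs.map Prod.fst).count n ≤ N n) →
      (∀ j, j ∈ del ↔ ∃ h : j < un.length, (un.take j).count (un[j]'h) < c (un[j]'h)) →
      goA pairs nn nm (sIdx del 0 un) (sIdx del 0 um) =
        (match goB pairs (positionsOf un) cur del nn nm with
         | (del', nn', nm') => (nn' ++ sIdx del' 0 un, nm' ++ sIdx del' 0 um)) := by
  intro pairs
  induction pairs with
  | nil =>
    intro cur c del nn nm hcur hcle hrem hdel
    simp only [goA, goB]
  | cons pr rest ih =>
    obtain ⟨name, md⟩ := pr
    intro cur c del nn nm hcur hcle hrem hdel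
    have hq : (positionsOf un).getD name [] = oF name 0 un := positionsOf_getD un name
    have hqlen : (oF name 0 un).length = un.count name := oF_length name un 0
    have hcN : c name < N name := by
      have h1 := hrem name
      rw [List.map_cons, List.count_cons] at h1
      simp at h1
      omega
    by_cases hg : c name < un.count name
    · -- this name is matched: A finds and deletes it, B records its position
      have hglt : cur.getD name 0 < ((positionsOf un).getD name []).length := by
        rw [hcur, hq, hqlen]; exact hg
      obtain ⟨p, hp0, hplt, hpv, hpcnt⟩ := oF_getD name un 0 (c name) (by rw [hqlen]; exact hg)
      rw [Nat.zero_add] at hp0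
      have hpum : p < um.length := by
        by_contra hno
        push_neg at hno
        have h1 := hpre p hplt hno
        rw [List.getD_eq_getElem un "" hplt, hpv, hpcnt] at h1
        omega
      have hpdel : p ∉ del := by
        intro hmem
        obtain ⟨h, hlt⟩ := (hdel p).mp hmem
        rw [hpv, hpcnt] at hlt
        omega
      have hidx : PySem.List.index? (sIdx del 0 un) name = some (cnt' del 0 p) := by
        apply sIdx_find del name un 0 p hplt hpv (by simpa using hpdel)
        intro j hj hjv
        have hjlt : j < un.length := by omega
        have hc : (un.take j).count (un[j]'hjlt) < c (un[j]'hjlt) := by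
          rw [hjv, ← hpcnt]
          exact count_take_lt name un j p hj (le_of_lt hplt) hjlt hjv
        simpa using (hdel j).mpr ⟨hjlt, hc⟩
      have hE1 := sIdx_erase del un 0 p hplt (by simpa using hpdel)
      have hE2 := sIdx_erase del um 0 p hpum (by simpa using hpdel)
      rw [Nat.zero_add] at hE1 hE2
      have hadd : del.add (((positionsOf un).getD name []).getD (cur.getD name 0) 0) = del ++ [p] := by
        rw [hcur, hq, hp0]
        exact PySem.Set.add_of_not_mem hpdel
      have hcur' : ∀ m, (cur.insert name (cur.getD name 0 + 1)).getD m 0 =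
          if m = name then c name + 1 else c m := by
        intro m
        rw [PySem.Dict.getD_insert]
        by_cases hm : m = name
        · simp [hm, hcur]
        · simp [hm, hcur]
      have hcle' : ∀ m, (if m = name then c name + 1 else c m) ≤ un.count m := by
        intro m
        by_cases hm : m = name
        · subst hm; simp; omega
        · simp [hm]; exact hcle m
      have hrem' : ∀ m, (if m = name then c name + 1 else c m) +
          (rest.map Prod.fst).count m ≤ N m := by
        intro m
        have h1 := hrem m
        rw [List.map_cons, List.count_cons] at h1
        by_cases hm : m = name
        · subst hm; simp at h1 ⊢; omega
        · have hb : (name == m) = false := by simpa using Ne.symm hm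
          rw [hb] at h1
          simp [hm] at h1 ⊢
          omega
      have hdel' : ∀ j, j ∈ del ++ [p] ↔ ∃ h : j < un.length,
          (un.take j).count (un[j]'h) < (if (un[j]'h) = name then c name + 1 else c (un[j]'h)) := by
        intro j
        rw [List.mem_append, List.mem_singleton, hdel j]
        constructor
        · rintro (⟨h, hlt⟩ | rfl)
          · refine ⟨h, ?_⟩
            by_cases hn : un[j]'h = name
            · rw [hn] at hlt ⊢
              split <;> omega
            · simpa only [if_neg hn] using hlt
          · refine ⟨hplt, ?_⟩
            rw [hpv, hpcnt]
            simp
        · rintro ⟨h, hlt⟩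
          by_cases hn : un[j]'h = name
          · rw [hn] at hlt
            have hlt' : (un.take j).count name < c name + 1 := by simpa using hlt
            by_cases hlt2 : (un.take j).count name < c name
            · left; exact ⟨h, by rw [hn]; exact hlt2⟩
            · right
              have hje : (un.take j).count name = c name := by omega
              rcases Nat.lt_trichotomy j p with hjp | hjp | hjp
              · exfalso
                have := count_take_lt name un j p hjp (le_of_lt hplt) h hn
                rw [hpcnt] at this
                omega
              · exact hjp
              · exfalso
                have := count_take_lt name un p j hjp (le_of_lt h) hplt hpv
                rw [hpcnt, hje] at this
                omega
          · rw [if_neg hn] at hlt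
            exact Or.inl ⟨h, hlt⟩
      simp only [goA, hidx, goB, if_pos hglt, hadd]
      rw [hE1, hE2]
      exact ih (cur.insert name (cur.getD name 0 + 1))
        (fun m => if m = name then c name + 1 else c m) (del ++ [p]) (nn ++ [name]) (nm ++ [md])
        hcur' hcle' hrem' hdel'
    · -- no remaining occurrence of this name: both sides skip it
      have hcond : ¬ cur.getD name 0 < ((positionsOf un).getD name []).length := by
        rw [hcur, hq, hqlen]; exact hg
      have hnone : PySem.List.index? (sIdx del 0 un) name = none := by
        rw [PySem.List.index?_eq_none_iff]
        apply sIdx_none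
        intro r hr hrv
        have hc : (un.take r).count (un[r]'hr) < c (un[r]'hr) := by
          rw [hrv]
          have := count_take_lt_count name un r hr hrv
          omega
        simpa using (hdel r).mpr ⟨hr, hc⟩
      simp only [goA, hnone, goB, if_neg hcond]
      refine ih cur c del nn nm hcur hcle ?_ hdel
      intro m
      have h1 := hrem m
      rw [List.map_cons, List.count_cons] at h1
      omega

-- ===== VERDICT (by name: the statement is the Claim_ definition above) =====
theorem update_names_py_spec : Claim_equal_update_names_py := by
  intro names metadatas un um _hdom hpre
  unfold Spec_update_names_py update_names_py update_names_py_alt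
  have h := main_loop un um (fun n => ((names.zip metadatas).map Prod.fst).count n) hpre
    (names.zip metadatas) PySem.Dict.empty (fun _ => 0) PySem.Set.empty [] []
    (fun n => PySem.Dict.getD_empty n 0) (fun n => Nat.zero_le _)
    (fun n => by simp)
    (by intro j; constructor
        · intro hj; cases hj
        · rintro ⟨h, hlt⟩; simp at hlt)
  rcases hg : goB (names.zip metadatas) (positionsOf un) PySem.Dict.empty PySem.Set.empty [] [] with ⟨del', nn', nm'⟩
  rw [hg] at h
  rw [show (PySem.Set.empty : PySem.Set Nat) = ([] : List Nat) from rfl, sIdx_nil, sIdx_nil] at h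
  rw [h]
  simp only [survivors_eq_sIdx]
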